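-- pv_equiv track=rewrite | github.com/julian-reed/The-Probability-Challenge | hash_function_analysis.py | generate_letter_combinations
-- ===== SOURCE A (Python) =====
-- from itertools import product
-- import string
--
-- def generate_letter_combinations(desired_size):
--     count = 0
--     length = 0
--     while (True):
--         length += 1
--         for combo in product(string.ascii_lowercase, repeat=length):
--             yield ''.join(combo)
--             count += 1
--             if count >= desired_size:
--                 return
-- ===== SOURCE B (Python) =====
-- import string
--
-- def generate_letter_combinations(desired_size):
--     k = desired_size if desired_size > 1 else 1
--     for j in range(1, k + 1):
--         chars = []
--         while j > 0:
--             j -= 1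
--             chars.append(string.ascii_lowercase[j % 26])
--             j //= 26
--         yield ''.join(reversed(chars))
-- ===== Notes on version B (the rewrite author's own statement) =====
-- stated objective: alternative
-- what changed: B computes the total number of yielded strings up front (desired_size, floored so that at least one string is emitted) and decodes each successive global index directly into its string via bijective base-26 numbering, eliminating A's itertools.product enumeration, running counter and early-return loop nest.
import Mathlib
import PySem

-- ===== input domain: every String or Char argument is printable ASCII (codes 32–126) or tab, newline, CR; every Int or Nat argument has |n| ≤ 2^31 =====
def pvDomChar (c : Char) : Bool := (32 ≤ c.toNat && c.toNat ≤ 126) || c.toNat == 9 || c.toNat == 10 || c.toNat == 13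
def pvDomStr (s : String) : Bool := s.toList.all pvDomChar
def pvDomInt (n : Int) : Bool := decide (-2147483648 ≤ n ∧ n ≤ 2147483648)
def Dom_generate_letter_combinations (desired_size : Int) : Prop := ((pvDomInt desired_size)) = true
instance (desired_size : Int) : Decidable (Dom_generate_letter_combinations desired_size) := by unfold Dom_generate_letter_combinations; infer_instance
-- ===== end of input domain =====

-- B replaces A's product enumeration with counter and early return by computing the total
-- count k = max(desired_size, 1) up front and decoding each 1-based global index directly
-- via bijective base-26 numbering (alternative decomposition, same cost).
-- Both ports return the list of all strings the Python generator yields (generators become lists).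

-- ===== PORT A =====
-- string.ascii_lowercase
def lettersA : List Char := "abcdefghijklmnopqrstuvwxyz".toList

-- itertools.product(string.ascii_lowercase, repeat=n), each tuple as a list of chars,
-- in itertools order (leftmost position varies slowest)
def prodRepeat : Nat → List (List Char)
  | 0 => [[]]
  | n + 1 => lettersA.flatMap (fun c => (prodRepeat n).map (fun rest => c :: rest))

-- the inner `for combo in product(...)` loop: yields, counts, early-returns when count >= desired
def innerA (desired : Int) : List (List Char) → Int → List String × Int × Bool
  | [], count => ([], count, false)
  | c :: rest, count =>
    let s := String.mk c          -- ''.join(combo)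
    let count' := count + 1
    if desired ≤ count' then ([s], count', true)
    else
      let r := innerA desired rest count'
      (s :: r.1, r.2.1, r.2.2)

-- termination helpers for loopA (cited by its decreasing_by)
theorem prodRepeat_ne_nil (n : Nat) : prodRepeat n ≠ [] := by
  induction n with
  | zero => simp [prodRepeat]
  | succ n ih =>
    simp only [prodRepeat]
    have : lettersA = 'a' :: "bcdefghijklmnopqrstuvwxyz".toList := by decide
    rw [this, List.flatMap_cons]
    simp [ih]

theorem innerA_false (desired : Int) (combos : List (List Char)) (count : Int)
    (out : List String) (cnt : Int)
    (h : innerA desired combos count = (out, cnt, false)) :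
    cnt = count + combos.length ∧ (combos ≠ [] → cnt < desired) := by
  induction combos generalizing count out cnt with
  | nil =>
    simp only [innerA, Prod.mk.injEq] at h
    refine ⟨by simp [← h.2.1], by simp⟩
  | cons c rest ih =>
    simp only [innerA] at h
    split at h
    · simp at h
    · next hlt =>
      rcases hr : innerA desired rest (count + 1) with ⟨o2, c2, d2⟩
      rw [hr] at h
      simp only [Prod.mk.injEq] at h
      obtain ⟨ho, hc, hd⟩ := h
      subst hd
      obtain ⟨e1, e2⟩ := ih (count + 1) o2 c2 hr
      refine ⟨by simp only [List.length_cons]; push_cast; omega, fun _ => ?_⟩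
      rcases eq_or_ne rest [] with hrest | hrest
      · subst hrest
        simp only [innerA, Prod.mk.injEq] at hr
        omega
      · exact hc ▸ e2 hrest

-- the `while True: length += 1; for ... : ...` loop of A
def loopA (desired : Int) (count : Int) (length : Nat) : List String :=
  match h : innerA desired (prodRepeat (length + 1)) count with
  | (out, _, true) => out
  | (out, cnt, false) => out ++ loopA desired cnt (length + 1)
termination_by (desired - count).toNat
decreasing_by
  have hne := prodRepeat_ne_nil (length + 1)
  obtain ⟨h1, h2⟩ := innerA_false desired _ count _ _ h
  have := h2 hne
  have hlen : 1 ≤ (prodRepeat (length + 1)).length := List.length_pos_iff.mpr hne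
  omega

def generate_letter_combinations (desired_size : Int) : List String :=
  loopA desired_size 0 0

-- ===== PORT B =====
def lettersB : List Char := "abcdefghijklmnopqrstuvwxyz".toList

-- the `while j > 0: j -= 1; chars.append(letters[j % 26]); j //= 26` loop of Source B,
-- producing chars in append order (all values of j are ≥ 0, so Nat arithmetic is exact)
def decodeB : Nat → List Char
  | 0 => []
  | j + 1 => lettersB.getD (j % 26) 'a' :: decodeB (j / 26)
decreasing_by
  exact Nat.lt_succ_of_le (Nat.div_le_self j 26)

-- k = desired_size if desired_size > 1 else 1; then one string per j in range(1, k+1)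
def generate_letter_combinations_alt (desired_size : Int) : List String :=
  let k : Nat := if 1 < desired_size then desired_size.toNat else 1
  (List.range' 1 k).map (fun j => String.mk (decodeB j).reverse)   -- ''.join(reversed(chars))

-- ===== PRECONDITION & SPEC =====
def Spec_generate_letter_combinations (desired_size : Int) (out : List String) : Prop := out = generate_letter_combinations_alt desired_size
instance (desired_size : Int) (out : List String) : Decidable (Spec_generate_letter_combinations desired_size out) := by unfold Spec_generate_letter_combinations; infer_instance

-- ===== CLAIM (what is proved, stated in full; the proofs are below) =====
def Claim_equal_generate_letter_combinations : Prop := ∀ (desired_size : Int), Dom_generate_letter_combinations desired_size → Spec_generate_letter_combinations desired_size (generate_letter_combinations desired_size)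

-- ===== LEMMAS AND PROOFS =====

-- fixed-length base-26 decoding, least-significant digit first (proof device)
def decodeChars : Nat → Nat → List Char
  | 0, _ => []
  | n + 1, j => lettersB.getD (j % 26) 'a' :: decodeChars n (j / 26)

-- number of strings of length ≤ L (offset of the length-(L+1) block in the global order)
def offN : Nat → Nat
  | 0 => 0
  | L + 1 => 26 * offN L + 26

-- the global sequence: n strings starting at 1-based global index s+1
def bseq (s n : Nat) : List String :=
  (List.range n).map (fun t => String.mk (decodeB (s + t + 1)).reverse)

theorem offN_succ (L : Nat) : offN (L + 1) = offN L + 26 ^ (L + 1) := by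
  have key : ∀ M, 25 * offN M + 26 = 26 ^ (M + 1) := by
    intro M
    induction M with
    | zero => simp [offN]
    | succ M ih =>
      have : 25 * offN (M + 1) + 26 = 26 * (25 * offN M + 26) := by simp [offN]; ring
      rw [this, ih]; ring
  have := key L
  simp only [offN]; omega

-- bijective base-26: global index offN L + i + 1 decodes to the fixed-length-(L+1) digits of i
theorem decodeB_eq_decodeChars (L : Nat) : ∀ i, i < 26 ^ (L + 1) →
    decodeB (offN L + i + 1) = decodeChars (L + 1) i := by
  induction L with
  | zero =>
    intro i hi
    simp only [offN, Nat.zero_add]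
    rw [decodeB]
    simp [decodeChars, decodeB, Nat.div_eq_of_lt (by omega : i < 26)]
  | succ L ih =>
    intro i hi
    have hidx : offN (L + 1) + i + 1 = (26 * offN L + 26 + i) + 1 := by simp [offN]
    rw [hidx, decodeB]
    have hmod : (26 * offN L + 26 + i) % 26 = i % 26 := by omega
    have hdiv : (26 * offN L + 26 + i) / 26 = offN L + i / 26 + 1 := by omega
    rw [hmod, hdiv, ih (i / 26) (by
      have : 26 ^ (L + 1 + 1) = 26 ^ (L + 1) * 26 := by ring
      exact Nat.div_lt_of_lt_mul (by omega))]
    rfl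

-- decomposing range (a*b) into high/low digits
theorem range_mul_flatMap (a b : Nat) :
    List.range (a * b) = (List.range a).flatMap (fun h => (List.range b).map (fun l => h * b + l)) := by
  induction a with
  | zero => simp
  | succ a ih =>
    rw [Nat.succ_mul, List.range_add, ih, List.range_succ, List.flatMap_append]
    simp

-- fixed-length decoding splits off the most significant digit
theorem decode_split (n : Nat) (h l : Nat) (hh : h < 26) (hl : l < 26 ^ n) :
    (decodeChars (n + 1) (h * 26 ^ n + l)).reverse
      = lettersB.getD h 'a' :: (decodeChars n l).reverse := by
  induction n generalizing h l with
  | zero =>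
    interval_cases l
    simp [decodeChars, Nat.mod_eq_of_lt hh]
  | succ n ih =>
    have hmod : (h * 26 ^ (n + 1) + l) % 26 = l % 26 := by
      rw [pow_succ, ← Nat.mul_assoc]
      generalize h * 26 ^ n = m
      omega
    have hdiv : (h * 26 ^ (n + 1) + l) / 26 = h * 26 ^ n + l / 26 := by
      rw [pow_succ, ← Nat.mul_assoc]
      generalize h * 26 ^ n = m
      omega
    have hl' : l / 26 < 26 ^ n := Nat.div_lt_of_lt_mul (by rw [mul_comm]; exact (pow_succ 26 n) ▸ hl)
    calc (decodeChars (n + 1 + 1) (h * 26 ^ (n + 1) + l)).reverse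
        = ((decodeChars (n + 1) (h * 26 ^ n + l / 26)).reverse) ++ [lettersB.getD (l % 26) 'a'] := by
          simp [decodeChars, hmod, hdiv]
      _ = (lettersB.getD h 'a' :: (decodeChars n (l / 26)).reverse) ++ [lettersB.getD (l % 26) 'a'] := by
          rw [ih h (l / 26) hh hl']
      _ = lettersB.getD h 'a' :: (decodeChars (n + 1) l).reverse := by
          simp [decodeChars]

theorem letters_eq : (List.range 26).map (fun h => lettersB.getD h 'a') = lettersA := by decide

-- fixed-length decoded indices enumerate exactly A's product tuples, in order
theorem range_map_decode (L : Nat) :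
    (List.range (26 ^ L)).map (fun i => (decodeChars L i).reverse) = prodRepeat L := by
  induction L with
  | zero => decide
  | succ L ih =>
    rw [pow_succ, mul_comm, range_mul_flatMap, List.map_flatMap]
    have step : ∀ h ∈ List.range 26,
        ((List.range (26 ^ L)).map (fun l => h * 26 ^ L + l)).map (fun i => (decodeChars (L+1) i).reverse)
          = (prodRepeat L).map (fun rest => lettersB.getD h 'a' :: rest) := by
      intro h hh
      rw [List.map_map, ← ih, List.map_map]
      apply List.map_congr_left
      intro l hl
      simp only [Function.comp]
      exact decode_split L h l (List.mem_range.mp hh) (List.mem_range.mp hl)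
    rw [List.flatMap_congr step]
    conv_rhs => rw [prodRepeat, ← letters_eq, List.flatMap_map]

theorem prodRepeat_length (n : Nat) : (prodRepeat n).length = 26 ^ n := by
  rw [← range_map_decode n, List.length_map, List.length_range]

-- the length-(L+1) block of the global sequence, as strings
theorem bseq_block (L : Nat) :
    bseq (offN L) (26 ^ (L + 1)) = (prodRepeat (L + 1)).map String.mk := by
  unfold bseq
  rw [← range_map_decode (L + 1), List.map_map]
  apply List.map_congr_left
  intro i hi
  simp only [Function.comp]
  rw [decodeB_eq_decodeChars L i (List.mem_range.mp hi)]

theorem bseq_append (s a b : Nat) : bseq s (a + b) = bseq s a ++ bseq (s + a) b := by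
  unfold bseq
  rw [List.range_add, List.map_append, List.map_map]
  congr 1
  apply List.map_congr_left
  intro t _
  have h1 : s + (a + t) + 1 = s + a + t + 1 := by omega
  simp [Function.comp, h1]

theorem bseq_take (s n m : Nat) (h : m ≤ n) : (bseq s n).take m = bseq s m := by
  unfold bseq
  rw [← List.map_take, List.take_range, Nat.min_eq_left h]

-- closed form of A's inner loop: it emits min(len, max 1 (desired-count)) strings
theorem innerA_spec (d : Int) (combos : List (List Char)) (count : Int) :
    innerA d combos count =
      (if (max 1 (d - count).toNat) ≤ combos.length
       then ((combos.take (max 1 (d - count).toNat)).map String.mk,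
             count + (max 1 (d - count).toNat : Nat), true)
       else (combos.map String.mk, count + combos.length, false)) := by
  induction combos generalizing count with
  | nil =>
    have hno : ¬ (max 1 (d - count).toNat ≤ ([] : List (List Char)).length) := by simp
    rw [if_neg hno]
    simp [innerA]
  | cons c rest ih =>
    simp only [innerA]
    by_cases hle : d ≤ count + 1
    · rw [if_pos hle]
      have hn : max 1 (d - count).toNat = 1 := by omega
      rw [if_pos (by rw [hn]; simp)]
      simp [hn]
    · rw [if_neg hle, ih]
      have h2 : (2 : Int) ≤ d - count := by omega
      have hn : max 1 (d - count).toNat = (d - count).toNat := by omega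
      have hn' : max 1 (d - (count + 1)).toNat = (d - count).toNat - 1 := by omega
      by_cases hr : (max 1 (d - (count + 1)).toNat) ≤ rest.length
      · rw [if_pos hr, if_pos (by simp only [List.length_cons]; omega)]
        simp only [hn, hn', List.map_take]
        have htk : (List.map String.mk (c :: rest)).take ((d - count).toNat)
            = String.mk c :: (List.map String.mk rest).take ((d - count).toNat - 1) := by
          rw [List.map_cons]
          rcases Nat.exists_eq_add_of_le (by omega : 1 ≤ (d - count).toNat) with ⟨m, hm⟩
          rw [hm]
          simp [Nat.add_comm 1 m]
        rw [htk]
        refine congrArg₂ _ rfl (congrArg₂ _ ?_ rfl)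
        push_cast; omega
      · rw [if_neg hr, if_neg (by simp only [List.length_cons]; omega)]
        simp only [List.map_cons, List.length_cons]
        refine congrArg₂ _ rfl (congrArg₂ _ ?_ rfl)
        push_cast; omega

-- A's outer loop produces the global sequence from offset offN L
theorem loopA_eq (d : Int) (count : Int) (L : Nat) :
    loopA d count L = bseq (offN L) (max 1 (d - count).toNat) := by
  rw [loopA]
  split
  · next out c hA =>
    rw [innerA_spec] at hA
    split_ifs at hA with hle
    · rw [prodRepeat_length] at hle
      simp only [Prod.mk.injEq] at hA
      rw [← hA.1, ← bseq_take (offN L) (26 ^ (L + 1)) _ hle, bseq_block, ← List.map_take]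
    · simp at hA
  · next out cnt hA =>
    rw [innerA_spec] at hA
    split_ifs at hA with hle
    · simp at hA
    · rw [prodRepeat_length] at hle
      simp only [Prod.mk.injEq, and_true] at hA
      obtain ⟨ho, hc⟩ := hA
      rw [prodRepeat_length] at hc
      have hp : 1 < 26 ^ (L + 1) := Nat.one_lt_pow (Nat.succ_ne_zero L) (by omega)
      have hneq : max 1 (d - count).toNat = 26 ^ (L + 1) + max 1 (d - cnt).toNat := by
        generalize hq : 26 ^ (L + 1) = p at hc hle hp
        omega
      rw [← ho, hneq, bseq_append, bseq_block, ← offN_succ]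
      rw [loopA_eq d cnt (L + 1)]
termination_by (d - count).toNat
decreasing_by
  omega

-- B is the global sequence from offset 0
theorem alt_eq (d : Int) : generate_letter_combinations_alt d = bseq 0 (max 1 d.toNat) := by
  have hk : (if 1 < d then d.toNat else 1) = max 1 d.toNat := by
    split <;> omega
  unfold generate_letter_combinations_alt bseq
  simp only [hk, List.range'_eq_map_range, List.map_map]
  apply List.map_congr_left
  intro t _
  have h1 : 1 + t = 0 + t + 1 := by omega
  simp [Function.comp, h1]

-- ===== VERDICT (by name: the statement is the Claim_ definition above) =====
theorem generate_letter_combinations_spec : Claim_equal_generate_letter_combinations := by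
  intro d _
  unfold Spec_generate_letter_combinations generate_letter_combinations
  rw [loopA_eq, alt_eq]
  simp [offN]
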